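-- pv_equiv track=rewrite | github.com/fariioodaazz/Ragex-To-NFA- | nfa_gui.py | expand_character_classes
-- ===== SOURCE A (Python) =====
-- def expand_character_classes(regex):
--     """Expand character classes like [a-z] or [0-9] into (a|b|c|...|z)."""
--     i = 0
--     expanded = ''
--     while i < len(regex):
--         if regex[i] == '[':
--             j = i + 1
--             while j < len(regex) and regex[j] != ']':
--                 j += 1
--             if j == len(regex):
--                 raise ValueError("Unmatched [ in regex")
--             content = regex[i+1:j]
--             if '-' in content and len(content) == 3:
--                 start, dash, end = content
--                 if dash != '-':
--                     raise ValueError("Invalid character class")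
--                 chars = [chr(c) for c in range(ord(start), ord(end)+1)]
--                 expanded += '(' + '|'.join(chars) + ')'
--             else:
--                 raise ValueError("Only simple ranges like [a-z] supported")
--             i = j + 1
--         else:
--             expanded += regex[i]
--             i += 1
--     return expanded
-- ===== SOURCE B (Python) =====
-- def expand_character_classes(regex):
--     """Expand character classes like [a-z] or [0-9] into (a|b|c|...|z)."""
--     out = []
--     pos = 0
--     while True:
--         lb = regex.find('[', pos)
--         if lb == -1:
--             out.append(regex[pos:])
--             return ''.join(out)
--         rb = regex.find(']', lb + 1)
--         if rb == -1:
--             raise ValueError("Unmatched [ in regex")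
--         content = regex[lb + 1:rb]
--         if '-' not in content or len(content) != 3:
--             raise ValueError("Only simple ranges like [a-z] supported")
--         start, dash, end = content
--         if dash != '-':
--             raise ValueError("Invalid character class")
--         out.append(regex[pos:lb])
--         out.append('(' + '|'.join(map(chr, range(ord(start), ord(end) + 1))) + ')')
--         pos = rb + 1
-- ===== Notes on version B (the rewrite author's own statement) =====
-- stated objective: faster
-- what changed: B replaces A's character-by-character while loop with repeated string concatenation by find()-jumps to the next '[' / ']', slicing whole literal segments into a piece list that is joined once at the end.
import Mathlib
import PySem

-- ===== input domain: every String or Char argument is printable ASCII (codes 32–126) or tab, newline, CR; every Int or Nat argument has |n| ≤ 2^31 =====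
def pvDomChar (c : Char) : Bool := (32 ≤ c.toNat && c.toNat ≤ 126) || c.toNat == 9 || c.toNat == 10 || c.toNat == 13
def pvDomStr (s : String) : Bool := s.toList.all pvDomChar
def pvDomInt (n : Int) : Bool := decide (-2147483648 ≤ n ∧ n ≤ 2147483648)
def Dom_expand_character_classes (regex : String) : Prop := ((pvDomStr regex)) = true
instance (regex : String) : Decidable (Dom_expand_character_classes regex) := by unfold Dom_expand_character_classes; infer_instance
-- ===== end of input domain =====

-- B replaces A's char-by-char scan with find-jumps over whole segments and a piece list; return-value
-- equivalence only, proved on Pre_ (exactly the inputs where A returns instead of raising ValueError).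

-- shared transliteration of the expression '(' + '|'.join(chr(c) for c in range(ord(start), ord(end)+1)) + ')'
-- (identical in both Python sources)
def pvJoinBar : List Char → List Char
  | [] => []
  | [c] => [c]
  | c :: rest => c :: '|' :: pvJoinBar rest

def pvGroup (s e : Char) : List Char :=
  '(' :: pvJoinBar ((PySem.List.pyRange (s.toNat : Int) ((e.toNat : Int) + 1) 1).map
    (fun c => Char.ofNat c.toNat)) ++ [')']

-- ===== PORT A =====
-- inner while loop 'while j < len and regex[j] != ']'': returns (chars before first ']', rest from ']')
def pvScanA : List Char → List Char × List Char
  | [] => ([], [])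
  | c :: rest =>
    if c = ']' then ([], c :: rest)
    else
      let p := pvScanA rest
      (c :: p.1, p.2)

theorem pvScanA_snd_le : ∀ l : List Char, (pvScanA l).2.length ≤ l.length := by
  intro l
  induction l with
  | nil => simp [pvScanA]
  | cons c rest ih =>
    simp only [pvScanA]
    split
    · simp
    · simpa using Nat.le_succ_of_le ih

-- raise branches (unreachable under Pre_) return the accumulator
def pvExpandA (acc : List Char) : List Char → List Char
  | [] => acc
  | c :: rest =>
    if c = '[' then
      match h : pvScanA rest with
      | (_, []) => acc
      | (content, _ :: rest') =>
        if content.contains '-' && content.length == 3 then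
          match content with
          | [s, d, e] =>
            if d ≠ '-' then acc else pvExpandA (acc ++ pvGroup s e) rest'
          | _ => acc
        else acc
    else pvExpandA (acc ++ [c]) rest
termination_by l => l.length
decreasing_by
  · have := pvScanA_snd_le rest
    rw [h] at this
    simp at this ⊢
    omega
  · simp

def expand_character_classes (regex : String) : String :=
  String.ofList (pvExpandA [] regex.toList)

-- ===== PORT B =====
-- raise branches (unreachable under Pre_) return the remaining suffix
def pvExpandB (l : List Char) : List Char :=
  match h : l.idxOf? '[' with
  | none => l
  | some lb =>
    match (l.drop (lb+1)).idxOf? ']' with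
    | none => l
    | some k =>
      let content := (l.drop (lb+1)).take k
      if content.contains '-' && content.length == 3 then
        match content with
        | [s, d, e] =>
          if d = '-' then l.take lb ++ pvGroup s e ++ pvExpandB ((l.drop (lb+1)).drop (k+1))
          else l
        | _ => l
      else l
termination_by l.length
decreasing_by
  have hne : l ≠ [] := by
    intro hl; subst hl
    simp [List.idxOf?, List.findIdx?, List.findIdx?.go] at h
  cases l with
  | nil => exact absurd rfl hne
  | cons a t => simp

def expand_character_classes_alt (regex : String) : String :=
  String.ofList (pvExpandB regex.toList)

-- ===== PRECONDITION & SPEC =====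
-- Pre_: every '[' is immediately followed by exactly 'x', '-', 'y', ']' (x, y not ']'),
-- i.e. exactly the inputs on which A returns instead of raising ValueError.
-- DFA over the string: state 0 = outside a class, 1-4 = inside '[x-y]', 5 = rejected;
-- accepts iff every '[' opens exactly 'x', '-', 'y', ']' (x, y not ']'), i.e. iff A returns.
def pvPreStep (st : Nat) (c : Char) : Nat :=
  if st = 0 then (if c = '[' then 1 else 0)
  else if st = 1 then (if c = ']' then 5 else 2)
  else if st = 2 then (if c = '-' then 3 else 5)
  else if st = 3 then (if c = ']' then 5 else 4)
  else if st = 4 then (if c = ']' then 0 else 5)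
  else 5

def pvPre (l : List Char) : Bool := l.foldl pvPreStep 0 == 0

def Pre_expand_character_classes (regex : String) : Prop := pvPre regex.toList = true
instance (regex : String) : Decidable (Pre_expand_character_classes regex) := by
  unfold Pre_expand_character_classes; infer_instance

def pvWitness_expand_character_classes : String := "x[a-c]y"

def Spec_expand_character_classes (regex : String) (out : String) : Prop :=
  out = expand_character_classes_alt regex
instance (regex : String) (out : String) : Decidable (Spec_expand_character_classes regex out) := by
  unfold Spec_expand_character_classes; infer_instance

-- ===== CLAIM (what is proved, stated in full; the proofs are below) =====
def Claim_equal_expand_character_classes : Prop :=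
  ∀ (regex : String), Dom_expand_character_classes regex →
    Pre_expand_character_classes regex →
    Spec_expand_character_classes regex (expand_character_classes regex)

-- ===== LEMMAS AND PROOFS =====

theorem pvExpandB_nil : pvExpandB [] = [] := by
  simp [pvExpandB]

theorem pvExpandB_eq (l : List Char) : pvExpandB l =
    match l.idxOf? '[' with
    | none => l
    | some lb =>
      match (l.drop (lb+1)).idxOf? ']' with
      | none => l
      | some k =>
        let content := (l.drop (lb+1)).take k
        if content.contains '-' && content.length == 3 then
          match content with
          | [s, d, e] =>
            if d = '-' then l.take lb ++ pvGroup s e ++ pvExpandB ((l.drop (lb+1)).drop (k+1))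
            else l
          | _ => l
        else l := by
  rw [pvExpandB.eq_def]
  cases h : l.idxOf? '[' <;> rfl

theorem pvExpandA_eq (acc : List Char) (c : Char) (rest : List Char) :
    pvExpandA acc (c :: rest) =
      if c = '[' then
        match pvScanA rest with
        | (_, []) => acc
        | (content, _ :: rest') =>
          if content.contains '-' && content.length == 3 then
            match content with
            | [s, d, e] => if d ≠ '-' then acc else pvExpandA (acc ++ pvGroup s e) rest'
            | _ => acc
          else acc
      else pvExpandA (acc ++ [c]) rest := by
  rw [pvExpandA.eq_def]
  by_cases hc : c = '['
  · simp only [if_pos hc]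
    split
    next fst heq => conv_rhs => rw [heq]
    next content head rest' heq =>
      conv_rhs => rw [heq]
      rcases content with _ | ⟨s, _ | ⟨d, _ | ⟨e, _ | ⟨f, t⟩⟩⟩⟩ <;> rfl
  · simp [hc]

theorem pvExpandB_cons (c : Char) (rest : List Char) (hc : c ≠ '[') :
    pvExpandB (c :: rest) = c :: pvExpandB rest := by
  rw [pvExpandB_eq (c :: rest), pvExpandB_eq rest]
  have hc' : (c == '[') = false := by simpa using hc
  rw [List.idxOf?_cons, hc']
  simp only [Bool.false_eq_true, if_false]
  cases hr : rest.idxOf? '[' with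
  | none => simp
  | some lb =>
    simp only [Option.map_some, List.drop_succ_cons]
    cases hk : (rest.drop (lb + 1)).idxOf? ']' with
    | none => simp
    | some k =>
      simp only []
      split
      next hcond =>
        split
        next s d e hcontent =>
          split
          next => simp [List.take_succ_cons]
          next => rfl
        next => rfl
      next => rfl

theorem pvFoldl5 : ∀ l : List Char, l.foldl pvPreStep 5 = 5 := by
  intro l
  induction l with
  | nil => rfl
  | cons c rest ih => simpa [List.foldl_cons, pvPreStep] using ih

set_option maxHeartbeats 2000000 in
theorem key : ∀ (n : Nat) (l : List Char), l.length ≤ n → pvPre l = true →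
    ∀ acc, pvExpandA acc l = acc ++ pvExpandB l := by
  intro n
  induction n with
  | zero =>
    intro l hl _ acc
    have hnil : l = [] := List.eq_nil_of_length_eq_zero (Nat.le_zero.mp hl)
    subst hnil
    simp [pvExpandA, pvExpandB_nil]
  | succ n ih =>
    intro l hl hpre acc
    cases l with
    | nil => simp [pvExpandA, pvExpandB_nil]
    | cons c rest =>
      by_cases hc : c = '['
      · subst hc
        cases rest with
        | nil => simp [pvPre, pvPreStep] at hpre
        | cons a t1 =>
          cases t1 with
          | nil =>
            simp [pvPre, pvPreStep] at hpre
            split_ifs at hpre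
          | cons d t2 =>
            cases t2 with
            | nil =>
              simp [pvPre, pvPreStep] at hpre
              split_ifs at hpre <;> simp_all
            | cons b t3 =>
              cases t3 with
              | nil =>
                simp [pvPre, pvPreStep] at hpre
                split_ifs at hpre <;> simp_all
              | cons e rest' =>
                have hfoldl : pvPre ('[' :: a :: d :: b :: e :: rest') = true := hpre
                have ha : a ≠ ']' := by
                  intro h; subst h
                  simp [pvPre, pvPreStep, pvFoldl5] at hfoldl
                have hd : d = '-' := by
                  by_contra h
                  simp [pvPre, pvPreStep, ha, h, pvFoldl5] at hfoldl
                have hb : b ≠ ']' := by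
                  intro h; subst h
                  simp [pvPre, pvPreStep, ha, hd, pvFoldl5] at hfoldl
                have he : e = ']' := by
                  by_contra h
                  simp [pvPre, pvPreStep, ha, hd, hb, h, pvFoldl5] at hfoldl
                have hrest : pvPre rest' = true := by
                  simpa [pvPre, pvPreStep, ha, hd, hb, he] using hfoldl
                subst hd; subst he
                have hlen : rest'.length ≤ n := by
                  simp at hl; omega
                -- left side
                rw [pvExpandA_eq, if_pos rfl]
                have hs : pvScanA (a :: '-' :: b :: ']' :: rest') = ([a, '-', b], ']' :: rest') := by
                  simp [pvScanA, ha, hb]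
                rw [hs]
                simp only [List.contains_cons, beq_self_eq_true, Bool.or_true, Bool.true_or,
                  List.length_cons, List.length_nil, Nat.reduceAdd, beq_self_eq_true,
                  Bool.and_self, ne_eq, not_true_eq_false, if_false]
                -- right side
                rw [pvExpandB_eq ('[' :: a :: '-' :: b :: ']' :: rest')]
                have h0 : ('[' :: a :: '-' :: b :: ']' :: rest').idxOf? '[' = some 0 := by
                  rw [List.idxOf?_cons]; simp
                rw [h0]
                simp only [List.drop_succ_cons, List.drop_zero]
                have ha' : (a == ']') = false := by simpa using ha
                have hb' : (b == ']') = false := by simpa using hb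
                have h3 : (a :: '-' :: b :: ']' :: rest').idxOf? ']' = some 3 := by
                  rw [List.idxOf?_cons, ha', List.idxOf?_cons, List.idxOf?_cons, hb',
                    List.idxOf?_cons]
                  simp
                rw [h3]
                rw [ih rest' hlen hrest]
                simp [List.append_assoc]
      · rw [pvExpandA.eq_def]
        simp only [if_neg hc]
        have hpre' : pvPre rest = true := by
          simpa [pvPre, pvPreStep, hc] using hpre
        have hlen : rest.length ≤ n := by simp at hl; omega
        rw [ih rest hlen hpre' (acc ++ [c]), pvExpandB_cons c rest hc]
        simp

-- ===== VERDICT (by name: the statement is the Claim_ definition above) =====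
theorem expand_character_classes_spec : Claim_equal_expand_character_classes := by
  intro regex _ hpre
  unfold Spec_expand_character_classes expand_character_classes expand_character_classes_alt
  rw [key regex.toList.length regex.toList le_rfl hpre []]
  rfl
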